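-- pv_equiv track=rewrite | github.com/TrentCarter/lnsp-phase-4 | src/parsers/parse_conceptnet_smart.py | _dfs
-- ===== SOURCE A (Python) =====
-- from typing import Dict, List, Set, Tuple
--
-- def _dfs(node: str, graph: Dict[str, List[str]], max_depth: int = 20) -> List[List[str]]:
--     """Iterative DFS."""
--     paths = []
--     stack = [(node, [])]
--
--     while stack:
--         curr, path = stack.pop()
--
--         if curr in path or len(path) >= max_depth:
--             if path:
--                 paths.append(path + [curr])
--             continue
--
--         new_path = path + [curr]
--
--         if curr not in graph or not graph[curr]:
--             paths.append(new_path)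
--             continue
--
--         for child in graph[curr]:
--             if child not in new_path:
--                 stack.append((child, new_path))
--
--     return paths if paths else [[node]]
-- ===== SOURCE B (Python) =====
-- from typing import Dict, List
--
-- def _dfs(node: str, graph: Dict[str, List[str]], max_depth: int = 20) -> List[List[str]]:
--     """Recursive DFS returning the list of paths (children visited in reversed
--     adjacency order, matching the LIFO pop order of the iterative version)."""
--     def rec(curr: str, path: List[str]) -> List[List[str]]:
--         if curr in path or len(path) >= max_depth:
--             return [path + [curr]] if path else []
--         new_path = path + [curr]
--         children = graph.get(curr)
--         if not children:
--             return [new_path]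
--         out: List[List[str]] = []
--         for child in reversed(children):
--             if child not in new_path:
--                 out.extend(rec(child, new_path))
--         return out
--
--     paths = rec(node, [])
--     return paths if paths else [[node]]
-- ===== Notes on version B (the rewrite author's own statement) =====
-- stated objective: simpler
-- what changed: Replaces the explicit LIFO-stack while-loop with accumulator bookkeeping by a short recursive DFS helper that returns and concatenates the children's path lists, visiting children in reversed adjacency order (the stack's pop order).
import Mathlib
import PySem

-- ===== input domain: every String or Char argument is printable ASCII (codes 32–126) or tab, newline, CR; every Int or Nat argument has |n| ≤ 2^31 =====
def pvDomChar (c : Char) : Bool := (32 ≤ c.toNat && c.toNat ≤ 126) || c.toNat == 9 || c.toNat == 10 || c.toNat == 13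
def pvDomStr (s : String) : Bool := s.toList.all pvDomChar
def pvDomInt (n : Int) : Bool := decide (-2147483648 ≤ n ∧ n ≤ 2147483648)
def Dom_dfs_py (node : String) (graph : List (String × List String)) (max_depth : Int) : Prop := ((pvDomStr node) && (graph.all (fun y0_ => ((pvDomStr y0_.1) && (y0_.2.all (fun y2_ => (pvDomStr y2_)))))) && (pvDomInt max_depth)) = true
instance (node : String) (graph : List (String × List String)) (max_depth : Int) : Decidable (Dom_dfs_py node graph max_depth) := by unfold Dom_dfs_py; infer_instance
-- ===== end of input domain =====

-- B replaces A's explicit LIFO-stack while-loop by a recursive DFS helper that returns and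
-- concatenates the children's path lists (children visited in reversed adjacency order, which
-- is exactly the stack's pop order); same return value, neither version has side effects.

-- Shared dict primitive: first-match association-list lookup — the Lean image of
-- `graph[curr]` / `graph.get(curr)` on the dict parameter (exact: lookup = first match).
def lookupFirst (g : List (String × List String)) (k : String) : Option (List String) :=
  match g with
  | [] => none
  | (k', v) :: rest => if k' = k then some v else lookupFirst rest k

-- weight of one stack entry, the measure of A's while-loop over the whole stack,
-- and the base W (total number of child entries in the graph, plus 2)
def pvWt (W : Nat) (max_depth : Int) (path : List String) : Nat :=
  W ^ (max_depth - path.length).toNat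

def pvMu (W : Nat) (max_depth : Int) (stack : List (String × List String)) : Nat :=
  (stack.map (fun cp => pvWt W max_depth cp.2)).sum

def pvW (graph : List (String × List String)) : Nat :=
  (graph.map (fun kv => kv.2.length)).sum + 2

-- termination lemma: a looked-up children list is no longer than the graph's total size
theorem lookupFirst_len_le (g : List (String × List String)) (k : String) (cs : List String)
    (h : lookupFirst g k = some cs) : cs.length ≤ (g.map (fun kv => kv.2.length)).sum := by
  induction g with
  | nil => simp [lookupFirst] at h
  | cons hd tl ih =>
    simp only [lookupFirst] at h
    split at h
    · cases h; simp
    · have := ih h; simp; omega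

-- termination lemma: the push loop adds at most cs.length entries, each of weight pvWt np
theorem pvMu_foldl_le (W : Nat) (max_depth : Int) (np : List String)
    (cs : List String) (rest : List (String × List String)) :
    pvMu W max_depth
        (cs.foldl (fun st child => if _ : child ∈ np then st else (child, np) :: st) rest)
      ≤ cs.length * pvWt W max_depth np + pvMu W max_depth rest := by
  induction cs generalizing rest with
  | nil => simp
  | cons c cs ih =>
    simp only [List.foldl_cons]
    refine le_trans (ih _) ?_
    split <;> simp [pvMu, Nat.succ_mul] <;> omega

-- ===== PORT A =====
-- A's while-loop: the stack keeps its top at the head (Python append/pop = cons/uncons);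
-- `paths` is the accumulator list A appends to.
def dfsLoop (graph : List (String × List String)) (max_depth : Int)
    (stack : List (String × List String)) (paths : List (List String)) :
    List (List String) :=
  match stack with
  | [] => paths
  | (curr, path) :: rest =>
    if curr ∈ path ∨ (path.length : Int) ≥ max_depth then
      if path = [] then dfsLoop graph max_depth rest paths
      else dfsLoop graph max_depth rest (paths ++ [path ++ [curr]])
    else
      let new_path := path ++ [curr]
      match hlk : lookupFirst graph curr with
      | none => dfsLoop graph max_depth rest (paths ++ [new_path])
      | some [] => dfsLoop graph max_depth rest (paths ++ [new_path])
      | some cs =>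
        dfsLoop graph max_depth
          (cs.foldl (fun st child => if child ∈ new_path then st else (child, new_path) :: st) rest)
          paths
termination_by pvMu (pvW graph) max_depth stack
decreasing_by
  · have h1 : 1 ≤ pvWt (pvW graph) max_depth path := Nat.one_le_pow _ _ (by unfold pvW; omega)
    simp only [pvMu, List.map_cons, List.sum_cons]
    omega
  · have h1 : 1 ≤ pvWt (pvW graph) max_depth path := Nat.one_le_pow _ _ (by unfold pvW; omega)
    simp only [pvMu, List.map_cons, List.sum_cons]
    omega
  · have h1 : 1 ≤ pvWt (pvW graph) max_depth path := Nat.one_le_pow _ _ (by unfold pvW; omega)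
    simp only [pvMu, List.map_cons, List.sum_cons]
    omega
  · have h1 : 1 ≤ pvWt (pvW graph) max_depth path := Nat.one_le_pow _ _ (by unfold pvW; omega)
    simp only [pvMu, List.map_cons, List.sum_cons]
    omega
  · rename_i hguard
    have hlt : (path.length : Int) < max_depth := by
      rcases not_or.mp hguard with ⟨_, h2⟩; omega
    have hW2 : 2 ≤ pvW graph := by unfold pvW; omega
    have hcs : cs.length ≤ pvW graph - 2 := by
      have := lookupFirst_len_le graph curr cs hlk
      unfold pvW; omega
    refine lt_of_le_of_lt (pvMu_foldl_le _ _ _ _ _) ?_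
    have hm : (max_depth - (path.length : Int)).toNat
        = (max_depth - ((path.length : Int) + 1)).toNat + 1 := by omega
    have hb : cs.length * pvWt (pvW graph) max_depth (path ++ [curr])
        < pvWt (pvW graph) max_depth path := by
      have hpow : 1 ≤ (pvW graph) ^ (max_depth - ((path.length : Int) + 1)).toNat :=
        Nat.one_le_pow _ _ (by omega)
      unfold pvWt
      simp only [List.length_append, List.length_cons, List.length_nil]
      rw [show ((path.length + 1 : Nat) : Int) = (path.length : Int) + 1 by push_cast; ring]
      rw [hm, pow_succ]
      calc cs.length * (pvW graph) ^ (max_depth - ((path.length : Int) + 1)).toNat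
          < pvW graph * (pvW graph) ^ (max_depth - ((path.length : Int) + 1)).toNat :=
            Nat.mul_lt_mul_of_lt_of_le (by omega) le_rfl (by omega)
        _ = (pvW graph) ^ (max_depth - ((path.length : Int) + 1)).toNat * pvW graph := by ring
    simp only [pvMu, List.map_cons, List.sum_cons]
    omega

def dfs_py (node : String) (graph : List (String × List String)) (max_depth : Int) :
    List (List String) :=
  let paths := dfsLoop graph max_depth [(node, [])] []
  if paths = [] then [[node]] else paths

-- ===== PORT B =====
-- B's inner helper rec: returns the list of completed paths reached from curr via path
def dfsRec (graph : List (String × List String)) (max_depth : Int)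
    (curr : String) (path : List String) : List (List String) :=
  if curr ∈ path ∨ (path.length : Int) ≥ max_depth then
    if path = [] then [] else [path ++ [curr]]
  else
    let new_path := path ++ [curr]
    match lookupFirst graph curr with
    | none => [new_path]
    | some [] => [new_path]
    | some cs =>
      (cs.reverse.filter (fun c => c ∉ new_path)).flatMap
        (fun c => dfsRec graph max_depth c new_path)
termination_by (max_depth - path.length).toNat
decreasing_by
  rename_i hguard
  have hlt : (path.length : Int) < max_depth := by
    rcases not_or.mp hguard with ⟨_, h2⟩; omega
  simp only [List.length_append, List.length_cons, List.length_nil]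
  omega

def dfs_py_alt (node : String) (graph : List (String × List String)) (max_depth : Int) :
    List (List String) :=
  let paths := dfsRec graph max_depth node []
  if paths = [] then [[node]] else paths

-- ===== PRECONDITION & SPEC =====
def Spec_dfs_py (node : String) (graph : List (String × List String)) (max_depth : Int) (out : List (List String)) : Prop := out = dfs_py_alt node graph max_depth
instance (node : String) (graph : List (String × List String)) (max_depth : Int) (out : List (List String)) : Decidable (Spec_dfs_py node graph max_depth out) := by unfold Spec_dfs_py; infer_instance

-- ===== CLAIM (what is proved, stated in full; the proofs are below) =====
def Claim_equal_dfs_py : Prop := ∀ (node : String) (graph : List (String × List String)) (max_depth : Int), Dom_dfs_py node graph max_depth → Spec_dfs_py node graph max_depth (dfs_py node graph max_depth)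

-- ===== LEMMAS AND PROOFS =====

-- the for-loop pushing children equals prepending the kept children in reverse order
theorem foldl_push_eq (np : List String) (cs : List String)
    (rest : List (String × List String)) :
    cs.foldl (fun st child => if child ∈ np then st else (child, np) :: st) rest
      = ((cs.filter (fun c => c ∉ np)).reverse.map (fun c => (c, np))) ++ rest := by
  induction cs generalizing rest with
  | nil => simp
  | cons c cs ih =>
    simp only [List.foldl_cons, List.filter_cons]
    split
    · rename_i h
      rw [ih]
      simp [h]
    · rename_i h
      rw [ih]
      simp [h]

-- A's stack loop computes the accumulator followed by B's recursion on each stack entry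
theorem dfsLoop_eq_rec (graph : List (String × List String)) (max_depth : Int) :
    ∀ (stack : List (String × List String)) (paths : List (List String)),
      dfsLoop graph max_depth stack paths
        = paths ++ (stack.map (fun cp => dfsRec graph max_depth cp.1 cp.2)).flatten := by
  intro stack paths
  induction stack, paths using dfsLoop.induct graph max_depth with
  | case1 paths =>
    rw [dfsLoop.eq_def]
    simp
  | case2 paths k' rest hg ih =>
    rw [dfsLoop.eq_def]
    dsimp only
    rw [if_pos hg, if_pos rfl, ih]
    simp only [List.map_cons, List.flatten_cons]
    rw [dfsRec.eq_def, if_pos hg, if_pos rfl]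
    simp
  | case3 paths k' v rest hg hne ih =>
    rw [dfsLoop.eq_def]
    dsimp only
    rw [if_pos hg, if_neg hne, ih]
    simp only [List.map_cons, List.flatten_cons]
    rw [dfsRec.eq_def, if_pos hg, if_neg hne]
    simp
  | case4 paths k' v rest hg np hlk ih =>
    rw [dfsLoop.eq_def]
    dsimp only
    rw [if_neg hg]
    split
    · rw [ih]
      simp only [List.map_cons, List.flatten_cons]
      rw [dfsRec.eq_def, if_neg hg]
      simp [hlk]
      rfl
    · rename_i heq; rw [hlk] at heq; cases heq
    · rename_i heq; rw [hlk] at heq; cases heq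
  | case5 paths k' v rest hg np hlk ih =>
    rw [dfsLoop.eq_def]
    dsimp only
    rw [if_neg hg]
    split
    · rename_i heq; rw [hlk] at heq; cases heq
    · rw [ih]
      simp only [List.map_cons, List.flatten_cons]
      rw [dfsRec.eq_def, if_neg hg]
      simp [hlk]
      rfl
    · rename_i hcs' heq
      rw [hlk] at heq
      injection heq with h2
      exact absurd h2.symm hcs'
  | case6 paths k' v rest hg np cs hcs hlk ih =>
    rw [dfsLoop.eq_def]
    dsimp only
    rw [if_neg hg]
    split
    · rename_i heq; rw [hlk] at heq; cases heq
    · rename_i heq; rw [hlk] at heq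
      injection heq with h2
      exact absurd h2 hcs
    · rename_i heq
      rw [hlk] at heq
      injection heq with h2
      subst h2
      rw [show np = v ++ [k'] from rfl] at ih
      simp only [dite_eq_ite] at ih
      rw [foldl_push_eq] at ih
      rw [foldl_push_eq, ih]
      simp only [List.map_cons, List.flatten_cons]
      rw [dfsRec.eq_def, if_neg hg]
      simp [hlk, List.flatMap_def, List.map_map, Function.comp_def, List.filter_reverse,
        List.flatten_append, List.map_append, List.append_assoc, List.mem_append]

-- ===== VERDICT (by name: the statement is the Claim_ definition above) =====
theorem dfs_py_spec : Claim_equal_dfs_py := by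
  intro node graph max_depth _
  show dfs_py node graph max_depth = dfs_py_alt node graph max_depth
  unfold dfs_py dfs_py_alt
  rw [dfsLoop_eq_rec]
  simp
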